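-- pv_equiv track=rewrite | github.com/dlopezg/advent-of-code | 2020/day_13/bus.py | departures
-- ===== SOURCE A (Python) =====
-- from copy import deepcopy
--
-- def departures(buses):
--     timestamp, ids = buses
--     busIds = deepcopy(ids)
--     for idx, busId in enumerate(ids):
--         while busIds[idx] <= timestamp:
--             busIds[idx] += busId
--         busIds[idx] -= timestamp
--     return min(busIds) * ids[busIds.index(min(busIds))]
-- ===== SOURCE B (Python) =====
-- def departures(buses):
--     timestamp, ids = buses
--     best = min(ids, key=lambda b: b - timestamp % b)
--     return (best - timestamp % best) * best
-- ===== Notes on version B (the rewrite author's own statement) =====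
-- stated objective: faster
-- what changed: Replaces the per-bus increment-until-past-timestamp while loop plus min/index/lookup pipeline with a single min-with-key over ids using the closed-form modular wait busId - timestamp % busId.
-- outside the precondition, e.g. on departures((-5, [3])): A returns 24, B returns 6; on departures((-10, [-3])): A returns -21, B returns 6; on departures((5, [3, 0])): A does not finish within the time limit, B raises ZeroDivisionError
import Mathlib
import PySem

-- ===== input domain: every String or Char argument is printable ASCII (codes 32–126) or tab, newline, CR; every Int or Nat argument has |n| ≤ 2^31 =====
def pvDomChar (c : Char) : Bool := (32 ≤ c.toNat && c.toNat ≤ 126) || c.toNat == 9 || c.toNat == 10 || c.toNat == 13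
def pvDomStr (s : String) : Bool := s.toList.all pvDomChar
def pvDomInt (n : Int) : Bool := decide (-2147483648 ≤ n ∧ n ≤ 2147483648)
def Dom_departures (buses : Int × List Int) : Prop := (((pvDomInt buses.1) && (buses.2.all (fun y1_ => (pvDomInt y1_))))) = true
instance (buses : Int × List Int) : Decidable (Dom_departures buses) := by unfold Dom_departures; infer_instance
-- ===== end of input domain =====

-- B replaces A's per-bus increment-until-past-timestamp loop by the direct modular wait
-- busId - timestamp % busId and Python's min-with-key; objective: faster (asymptotic).


-- ===== PORT A =====
-- the 'while busIds[idx] <= timestamp: busIds[idx] += busId' loop; the '0 < b' guard only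
-- makes the recursion total (Python diverges there; such inputs are outside Pre_)
def bump (t b v : Int) : Int :=
  if _h : v ≤ t ∧ 0 < b then bump t b (v + b) else v
termination_by (t + 1 - v).toNat
decreasing_by omega

def departures (buses : Int × List Int) : Int :=
  let t := buses.1
  let ids := buses.2
  -- each loop iteration touches only its own slot of busIds, so the for-loop is a map
  let busIds := ids.map (fun b => bump t b b - t)
  match PySem.List.min? busIds (fun y => y) with
  | none => 0   -- min([]) raises ValueError: outside Pre_
  | some m =>
    match PySem.List.index? busIds m with
    | none => 0   -- unreachable: m ∈ busIds
    | some i => m * (PySem.List.pyGet? ids (i : Int)).getD 0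

-- ===== PORT B =====
def departures_alt (buses : Int × List Int) : Int :=
  let t := buses.1
  match PySem.List.min? buses.2 (fun b => b - PySem.Int.mod t b) with
  | none => 0   -- min([]) raises ValueError: outside Pre_
  | some best => (best - PySem.Int.mod t best) * best

-- ===== PRECONDITION & SPEC =====
-- Pre_ excludes: empty bus lists (A raises ValueError); nonpositive bus ids (A diverges when
-- such an id is ≤ timestamp, and otherwise returns a value of the skipped loop that is
-- meaningless for bus periods); and negative timestamps, where A's wait busId - timestamp
-- (counting departures only from time busId on) and B's modular wait are both defensible
-- readings of an unspecified corner.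
def Pre_departures (buses : Int × List Int) : Prop :=
  buses.2 ≠ [] ∧ 0 ≤ buses.1 ∧ ∀ b ∈ buses.2, 0 < b
instance (buses : Int × List Int) : Decidable (Pre_departures buses) := by
  unfold Pre_departures; infer_instance

def pvWitness_departures : (Int × List Int) := (939, [7, 13, 59, 31, 19])

def Spec_departures (buses : Int × List Int) (out : Int) : Prop := out = departures_alt buses
instance (buses : Int × List Int) (out : Int) : Decidable (Spec_departures buses out) := by unfold Spec_departures; infer_instance

-- ===== CLAIM (what is proved, stated in full; the proofs are below) =====
def Claim_equal_departures : Prop := ∀ (buses : Int × List Int), Dom_departures buses → Pre_departures buses → Spec_departures buses (departures buses)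

-- ===== LEMMAS AND PROOFS =====

-- the while-loop computes the first multiple-offset value strictly past t
theorem bump_spec (t b v : Int) (hb : 0 < b) (hv : v ≤ t) :
    bump t b v = t + (b - (t - v) % b) := by
  induction v using bump.induct t b with
  | case1 v h ih =>
    rw [bump, dif_pos h]
    by_cases h2 : v + b ≤ t
    · rw [ih h2]
      have : (t - (v + b)) % b = (t - v) % b := by
        have := Int.sub_emod_right (t - v) b
        have e : t - (v + b) = t - v - b := by ring
        rw [e, this]
      rw [this]
    · rw [bump, dif_neg (by omega)]
      have h3 : (t - v) % b = t - v := Int.emod_eq_of_lt (by omega) (by omega)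
      rw [h3]; ring
  | case2 v h =>
    exact absurd ⟨hv, hb⟩ h

-- under Pre_, A's per-bus wait equals B's modular wait
theorem bump_wait (t b : Int) (hb : 0 < b) (ht : 0 ≤ t) :
    bump t b b - t = b - PySem.Int.mod t b := by
  rw [PySem.Int.mod_eq_emod_of_pos hb]
  by_cases h : b ≤ t
  · rw [bump_spec t b b hb h]
    have : (t - b) % b = t % b := Int.sub_emod_right t b
    rw [this]; ring
  · rw [bump, dif_neg (by omega)]
    have : t % b = t := Int.emod_eq_of_lt ht (by omega)
    rw [this]

-- one foldl step of min?
theorem min?_step (key : Int → Int) (a x : Int) (xs : List Int) :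
    PySem.List.min? (a :: x :: xs) key
      = PySem.List.min? ((if key x < key a then x else a) :: xs) key := by
  simp only [PySem.List.min?, List.foldl_cons]
  split_ifs with h <;> rfl

-- min over the mapped list is the mapped min (same foldl, keys aligned)
theorem min?_map_id' (f : Int → Int) (l : List Int) :
    PySem.List.min? (l.map f) (fun y => y) = (PySem.List.min? l f).map f := by
  cases l with
  | nil => simp [PySem.List.min?]
  | cons a l' =>
    induction l' generalizing a with
    | nil => simp [PySem.List.min?]
    | cons x xs ih =>
      rw [List.map_cons, List.map_cons, min?_step, min?_step]
      have hite : (if (fun y => y) (f x) < (fun y => y) (f a) then f x else f a)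
          = f (if f x < f a then x else a) := by
        simp only []
        exact (apply_ite f (f x < f a) x a).symm
      rw [hite]
      simpa using ih (if f x < f a then x else a)

-- min? returns the FIRST element achieving the minimal key: everything before it is strictly larger
theorem min?_first (f : Int → Int) (a : Int) (xs : List Int) (best : Int)
    (h : PySem.List.min? (a :: xs) f = some best) :
    ∃ p s, a :: xs = p ++ best :: s ∧ ∀ y ∈ p, f best < f y := by
  induction xs generalizing a with
  | nil =>
    simp [PySem.List.min?] at h
    exact ⟨[], [], by simp [h], by simp⟩
  | cons x xs ih =>
    have hstep : PySem.List.min? (a :: x :: xs) f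
        = PySem.List.min? ((if f x < f a then x else a) :: xs) f := by
      exact min?_step f a x xs
    by_cases h1 : f x < f a
    · rw [hstep, if_pos h1] at h
      obtain ⟨p, s, hps, hp⟩ := ih x h
      have hbx : f best ≤ f x := PySem.List.min?_isMin h x (by simp)
      refine ⟨a :: p, s, by simp [hps], ?_⟩
      intro y hy
      rcases List.mem_cons.mp hy with rfl | hy
      · omega
      · exact hp y hy
    · rw [hstep, if_neg h1] at h
      obtain ⟨p, s, hps, hp⟩ := ih a h
      cases p with
      | nil =>
        simp at hps
        exact ⟨[], x :: s, by simp [hps.1, hps.2], by simp⟩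
      | cons a' p' =>
        have hpair : a = a' ∧ xs = p' ++ best :: s := by simpa using hps
        obtain ⟨rfl, hxs⟩ := hpair
        have hfa : f best < f a := hp a (by simp)
        refine ⟨a :: x :: p', s, by simp [hxs], ?_⟩
        intro y hy
        rcases List.mem_cons.mp hy with rfl | hy
        · exact hfa
        rcases List.mem_cons.mp hy with rfl | hy
        · omega
        · exact hp y (by simp [hy])

-- the A-side min/index/lookup pipeline collapses to B's min-with-key
theorem pipeline (f : Int → Int) (l : List Int) (best : Int)
    (h : PySem.List.min? l f = some best) :
    (match PySem.List.index? (l.map f) (f best) with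
      | none => (0 : Int)
      | some i => f best * (PySem.List.pyGet? l (i : Int)).getD 0) = f best * best := by
  cases l with
  | nil => simp [PySem.List.min?] at h
  | cons a xs =>
    obtain ⟨p, s, hps, hp⟩ := min?_first f a xs best h
    rw [hps]
    have hnm : f best ∉ p.map f := by
      intro hm
      obtain ⟨y, hy, hfy⟩ := List.mem_map.mp hm
      have := hp y hy; omega
    have hidx : PySem.List.index? ((p ++ best :: s).map f) (f best) = some p.length := by
      rw [PySem.List.index?_eq_some_iff]
      exact ⟨p.map f, s.map f, by simp, by simp, hnm⟩
    rw [hidx]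
    have hget : PySem.List.pyGet? (p ++ best :: s) ((p.length : Nat) : Int) = some best := by
      rw [PySem.List.pyGet?_natCast]
      simp
    simp

theorem departures_eq (buses : Int × List Int) (hpre : Pre_departures buses) :
    departures buses = departures_alt buses := by
  obtain ⟨t, ids⟩ := buses
  obtain ⟨hne, ht, hpos⟩ := hpre
  simp only at hne ht hpos
  set f : Int → Int := fun b => b - PySem.Int.mod t b with hf
  have hmap : ids.map (fun b => bump t b b - t) = ids.map f := by
    apply List.map_congr_left
    intro b hb
    exact bump_wait t b (hpos b hb) ht
  unfold departures departures_alt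
  simp only [hmap]
  cases hmin : PySem.List.min? ids f with
  | none => exact absurd (PySem.List.min?_eq_none_iff ids f |>.mp hmin) hne
  | some best =>
    have h1 : PySem.List.min? (ids.map f) (fun y => y) = some (f best) := by
      rw [min?_map_id' f ids, hmin]; rfl
    simp only [h1]
    exact pipeline f ids best hmin

-- ===== VERDICT (by name: the statement is the Claim_ definition above) =====
theorem departures_spec : Claim_equal_departures := by
  intro buses _ hpre
  unfold Spec_departures
  exact departures_eq buses hpre
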